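-- pv_equiv track=rewrite | github.com/keepdevops/stock-pred | data/stock_new/src/database/nasdaq_database.py | _clean_symbol
-- ===== SOURCE A (Python) =====
-- def _clean_symbol(symbol: str) -> str:
--     """Clean symbol string."""
--     if not isinstance(symbol, str):
--         return str(symbol)
--
--     # Convert to uppercase and strip whitespace
--     cleaned = symbol.strip().upper()
--
--     # Replace special characters
--     replacements = {
--         '^': '-P-',    # Preferred shares
--         '/': '-W-',    # Warrants
--         '=': '-U-',    # Units
--         '$': '-D-',    # Debentures
--         '.': '-',      # Class shares
--         ' ': '-',      # Spaces
--         '+': '-PLUS-', # Special cases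
--     }
--
--     for char, replacement in replacements.items():
--         cleaned = cleaned.replace(char, replacement)
--
--     # Remove duplicate dashes
--     while '--' in cleaned:
--         cleaned = cleaned.replace('--', '-')
--
--     return cleaned.strip('-')
-- ===== SOURCE B (Python) =====
-- def _clean_symbol(symbol: str) -> str:
--     """Clean symbol string (single-pass re-implementation)."""
--     if not isinstance(symbol, str):
--         return str(symbol)
--
--     replacements = {
--         '^': '-P-',
--         '/': '-W-',
--         '=': '-U-',
--         '$': '-D-',
--         '.': '-',
--         ' ': '-',
--         '+': '-PLUS-',
--     }
--     mapped = ''.join(replacements.get(c, c) for c in symbol.strip().upper())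
--     # keep only the non-empty dash-free pieces; joining them with single
--     # dashes collapses duplicate dashes and strips leading/trailing ones
--     return '-'.join(p for p in mapped.split('-') if p)
-- ===== Notes on version B (the rewrite author's own statement) =====
-- stated objective: simpler
-- what changed: Replaces the seven sequential full-string .replace() passes plus the repeated while '--' rescan-and-replace loop with one per-character map pass followed by a split('-')/filter/join that collapses and strips dashes in a single linear step.
import Mathlib
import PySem

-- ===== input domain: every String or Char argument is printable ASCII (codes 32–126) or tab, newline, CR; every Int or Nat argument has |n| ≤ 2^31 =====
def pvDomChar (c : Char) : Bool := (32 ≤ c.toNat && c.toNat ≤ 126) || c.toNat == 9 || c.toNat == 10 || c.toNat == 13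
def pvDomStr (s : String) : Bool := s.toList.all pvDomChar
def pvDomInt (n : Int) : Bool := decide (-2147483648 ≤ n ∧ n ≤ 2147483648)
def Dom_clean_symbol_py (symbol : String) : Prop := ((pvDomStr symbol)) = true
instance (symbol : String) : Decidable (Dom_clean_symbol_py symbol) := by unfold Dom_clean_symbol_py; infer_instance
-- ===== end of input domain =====

-- B is a single per-character pass plus one split/filter/join instead of A's seven
-- full-string .replace passes and the repeated while-'--' rescan (objective: simpler).

-- ===== PORT A =====
-- the 'replacements' dict of A, in insertion order
def pvReps : List (String × String) :=
  [("^", "-P-"), ("/", "-W-"), ("=", "-U-"), ("$", "-D-"),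
   (".", "-"), (" ", "-"), ("+", "-PLUS-")]

-- one pass of "cleaned.replace('--', '-')" (what PySem.Chars.replace computes on
-- that literal pattern); needed only to prove termination of A's while loop
def pvR : List Char → List Char
  | [] => []
  | [c] => [c]
  | c :: d :: t => if c = '-' ∧ d = '-' then '-' :: pvR t else c :: pvR (d :: t)

theorem pvR_go (fuel : Nat) (l acc : List Char) (h : l.length ≤ fuel) :
    PySem.Chars.replace.go ['-', '-'] ['-'] fuel l acc = acc.reverse ++ pvR l := by
  induction fuel using Nat.strong_induction_on generalizing l acc with
  | _ fuel IH =>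
    match fuel, l with
    | 0, [] => rw [PySem.Chars.replace.go]; simp [pvR]
    | 0, c :: t => simp at h
    | fuel + 1, [] =>
      rw [PySem.Chars.replace.go]; simp [pvR]; omega
    | fuel + 1, [c] =>
      rw [PySem.Chars.replace.go]
      by_cases hc : c = '-'
      · subst hc
        simp [List.isPrefixOf]
        rw [IH fuel (by omega) [] ('-' :: acc) (by simp)]
        simp [pvR]
      · simp [List.isPrefixOf]
        rw [IH fuel (by omega) [] (c :: acc) (by simp)]
        simp [pvR]
    | fuel + 1, c :: d :: t =>
      have h' : t.length + 2 ≤ fuel + 1 := by simpa using h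
      rw [PySem.Chars.replace.go]
      by_cases hc : c = '-' ∧ d = '-'
      · obtain ⟨hc1, hc2⟩ := hc
        simp [List.isPrefixOf, hc1, hc2]
        rw [IH fuel (by omega) t ('-' :: acc) (by omega)]
        simp [pvR]
      · have hp : (['-', '-'].isPrefixOf (c :: d :: t)) = false := by
          simp [List.isPrefixOf]
          intro h1 h2; exact hc ⟨h1.symm, h2.symm⟩
        simp [hp]
        rw [IH fuel (by omega) (d :: t) (c :: acc) (by simp; omega)]
        simp [pvR, hc]

theorem pvR_length_le (l : List Char) : (pvR l).length ≤ l.length := by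
  induction l using pvR.induct with
  | case1 => simp [pvR]
  | case2 c => simp [pvR]
  | case3 c d t hcd ih => simp [pvR, hcd] at ih ⊢; omega
  | case4 c d t hcd ih => simp [pvR, hcd] at ih ⊢; omega

theorem pvReplace_dd (l : List Char) :
    PySem.Chars.replace l ['-', '-'] ['-'] = pvR l := by
  rw [PySem.Chars.replace]
  simp
  exact pvR_go l.length l [] (le_refl _)

theorem pvR_length_lt (l : List Char) (h : ['-', '-'] <:+: l) :
    (pvR l).length < l.length := by
  induction l using pvR.induct with
  | case1 => simp at h
  | case2 c =>
    have := h.length_le; simp at this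
  | case3 c d t hcd ih =>
    have := pvR_length_le t
    simp [pvR, hcd]; omega
  | case4 c d t hcd ih =>
    have hdt : ['-', '-'] <:+: (d :: t) := by
      rcases (List.infix_cons_iff.mp h) with hp | hi
      · exfalso
        rcases hp with ⟨r, hr⟩
        simp at hr
        exact hcd ⟨hr.1.symm ▸ rfl, hr.2.1.symm ▸ rfl⟩
      · exact hi
    have := ih hdt
    simp [pvR, hcd]
    simpa using this

theorem pvDedup_lt (s : String) (h : PySem.Str.isIn "--" s = true) :
    (PySem.Str.replace s "--" "-").toList.length < s.toList.length := by
  rw [PySem.Str.toList_replace]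
  have hin : PySem.Chars.isIn ("--".toList) s.toList = true := by
    simpa [PySem.Str.isIn] using h
  have hinf : ['-', '-'] <:+: s.toList := by
    have := (PySem.Chars.isIn_iff_infix _ _).mp hin
    simpa using this
  have : ("--".toList : List Char) = ['-', '-'] := by decide
  rw [this]
  have : ("-".toList : List Char) = ['-'] := by decide
  rw [this, pvReplace_dd]
  exact pvR_length_lt _ hinf

-- "while '--' in cleaned: cleaned = cleaned.replace('--', '-')"
def pvWhileDedup (s : String) : String :=
  if h : PySem.Str.isIn "--" s = true then pvWhileDedup (PySem.Str.replace s "--" "-") else s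
  termination_by s.toList.length
  decreasing_by exact pvDedup_lt s h

-- the isinstance(symbol, str) guard cannot fire on a String argument and is dropped
def clean_symbol_py (symbol : String) : String :=
  let cleaned := PySem.Str.upper (PySem.Str.strip symbol)
  let cleaned := pvReps.foldl (fun s pr => PySem.Str.replace s pr.1 pr.2) cleaned
  let cleaned := pvWhileDedup cleaned
  PySem.Str.stripChars cleaned "-"

-- ===== PORT B =====
-- B's 'replacements' dict
def pvRepsB : PySem.Dict String String :=
  PySem.Dict.ofList
    [("^", "-P-"), ("/", "-W-"), ("=", "-U-"), ("$", "-D-"),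
     (".", "-"), (" ", "-"), ("+", "-PLUS-")]

-- the isinstance(symbol, str) guard cannot fire on a String argument and is dropped
def clean_symbol_py_alt (symbol : String) : String :=
  let mapped := PySem.Str.join ""
    ((PySem.Str.upper (PySem.Str.strip symbol)).toList.map
      (fun c => PySem.Dict.getD pvRepsB (String.ofList [c]) (String.ofList [c])))
  PySem.Str.join "-" (((PySem.Str.split? mapped "-").getD []).filter (fun p => p ≠ ""))

-- ===== PRECONDITION & SPEC =====
def Spec_clean_symbol_py (symbol : String) (out : String) : Prop := out = clean_symbol_py_alt symbol
instance (symbol : String) (out : String) : Decidable (Spec_clean_symbol_py symbol out) := by unfold Spec_clean_symbol_py; infer_instance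

-- ===== CLAIM (what is proved, stated in full; the proofs are below) =====
def Claim_equal_clean_symbol_py : Prop := ∀ (symbol : String), Dom_clean_symbol_py symbol → Spec_clean_symbol_py symbol (clean_symbol_py symbol)

-- ===== LEMMAS AND PROOFS =====

-- the per-character replacement map both programs realize
def pvRepl (c : Char) : List Char :=
  if c = '^' then ['-', 'P', '-']
  else if c = '/' then ['-', 'W', '-']
  else if c = '=' then ['-', 'U', '-']
  else if c = '$' then ['-', 'D', '-']
  else if c = '.' then ['-']
  else if c = ' ' then ['-']
  else if c = '+' then ['-', 'P', 'L', 'U', 'S', '-']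
  else [c]

-- single-character str.replace is a flatMap
theorem pvReplace_single_go (c : Char) (new : List Char) (fuel : Nat) (l acc : List Char)
    (h : l.length ≤ fuel) :
    PySem.Chars.replace.go [c] new fuel l acc
      = acc.reverse ++ l.flatMap (fun x => if x = c then new else [x]) := by
  induction fuel generalizing l acc with
  | zero =>
    have : l = [] := by simpa using List.length_eq_zero_iff.mp (Nat.le_zero.mp h)
    subst this
    rw [PySem.Chars.replace.go]; simp
  | succ fuel IH =>
    match l with
    | [] => rw [PySem.Chars.replace.go]; simp; omega
    | x :: t =>
      rw [PySem.Chars.replace.go]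
      by_cases hx : x = c
      · subst hx
        simp [List.isPrefixOf]
        rw [IH t (new.reverse ++ acc) (by simpa using h)]
        simp
      · simp [List.isPrefixOf, Ne.symm hx]
        rw [IH t (x :: acc) (by simpa using h)]
        simp [hx]

theorem pvReplace_single (c : Char) (new s : List Char) :
    PySem.Chars.replace s [c] new = s.flatMap (fun x => if x = c then new else [x]) := by
  rw [PySem.Chars.replace]
  simp
  exact pvReplace_single_go c new s.length s [] (le_refl _)

-- the maximal dash-free non-empty segments of a string
def pvSegs : List Char → List (List Char)
  | [] => []
  | c :: t =>
    if c = '-' then pvSegs t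
    else (c :: t.takeWhile (fun x => x ≠ '-')) :: pvSegs (t.dropWhile (fun x => x ≠ '-'))
  termination_by l => l.length
  decreasing_by
    all_goals simp only [List.length_cons]
    · omega
    · exact Nat.lt_succ_of_le (List.length_dropWhile_le _ t)

-- str.split('-') as a simple recursion
def pvSplit : List Char → List Char → List (List Char)
  | [], cur => [cur.reverse]
  | c :: t, cur => if c = '-' then cur.reverse :: pvSplit t [] else pvSplit t (c :: cur)

theorem pvSplit_go (fuel : Nat) (l cur : List Char) (acc : List (List Char))
    (h : l.length < fuel) :
    PySem.Chars.splitOn.go ['-'] fuel l cur acc = acc.reverse ++ pvSplit l cur := by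
  induction fuel generalizing l cur acc with
  | zero => omega
  | succ fuel IH =>
    match l with
    | [] => rw [PySem.Chars.splitOn.go]; simp [pvSplit]; omega
    | x :: t =>
      rw [PySem.Chars.splitOn.go]
      by_cases hx : x = '-'
      · subst hx
        simp [List.isPrefixOf]
        rw [IH t [] (cur.reverse :: acc) (by simpa using h)]
        simp [pvSplit]
      · simp [List.isPrefixOf, Ne.symm hx]
        rw [IH t (x :: cur) acc (by simpa using h)]
        simp [pvSplit, hx]

theorem pvSegs_takeDrop (t : List Char) :
    (if t.takeWhile (fun x => x ≠ '-') = [] then [] else [t.takeWhile (fun x => x ≠ '-')]) ++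
      pvSegs (t.dropWhile (fun x => x ≠ '-')) = pvSegs t := by
  match t with
  | [] => simp [pvSegs]
  | c :: u =>
    by_cases hc : c = '-'
    · subst hc
      simp [List.takeWhile_cons, List.dropWhile_cons]
    · rw [pvSegs]
      simp [List.takeWhile_cons, List.dropWhile_cons, hc]

theorem pvSplit_filter (l cur : List Char) :
    (pvSplit l cur).filter (fun x => x ≠ []) =
      (if cur.reverse ++ l.takeWhile (fun x => x ≠ '-') = [] then []
       else [cur.reverse ++ l.takeWhile (fun x => x ≠ '-')]) ++
        pvSegs (l.dropWhile (fun x => x ≠ '-')) := by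
  induction l generalizing cur with
  | nil =>
    simp [pvSplit, pvSegs, List.filter]
    by_cases hcur : cur = [] <;> simp [hcur]
  | cons c t IH =>
    by_cases hc : c = '-'
    · subst hc
      rw [pvSplit, if_pos rfl, List.filter_cons, IH []]
      simp only [List.reverse_nil, List.nil_append, pvSegs_takeDrop]
      have hseg : pvSegs ('-' :: t) = pvSegs t := by rw [pvSegs]; simp
      by_cases hcur : cur.reverse = [] <;> simp [hcur, hseg]
    · rw [pvSplit]
      simp only [if_neg hc]
      rw [IH (c :: cur)]
      simp [List.takeWhile_cons, List.dropWhile_cons, hc]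

theorem pvSplitOn_filter (s : List Char) :
    (PySem.Chars.splitOn s ['-']).filter (fun x => x ≠ []) = pvSegs s := by
  rw [PySem.Chars.splitOn, pvSplit_go (s.length + 1) s [] [] (by omega)]
  simp only [List.reverse_nil, List.nil_append]
  rw [pvSplit_filter]
  simpa using pvSegs_takeDrop s

theorem pvR_takeWhile (l : List Char) :
    (pvR l).takeWhile (fun x => x ≠ '-') = l.takeWhile (fun x => x ≠ '-') := by
  induction l using pvR.induct with
  | case1 => simp [pvR]
  | case2 c => simp [pvR]
  | case3 c d t hcd ih =>
    obtain ⟨h1, h2⟩ := hcd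
    subst h1; subst h2
    simp [pvR, List.takeWhile_cons]
  | case4 c d t hcd ih =>
    rw [pvR, if_neg hcd]
    by_cases hc : c = '-'
    · simp [hc, List.takeWhile_cons]
    · simp at ih ⊢
      simp [List.takeWhile_cons, hc, ih]

theorem pvR_dropWhile (l : List Char) :
    (pvR l).dropWhile (fun x => x ≠ '-') = pvR (l.dropWhile (fun x => x ≠ '-')) := by
  induction l using pvR.induct with
  | case1 => simp [pvR]
  | case2 c =>
    by_cases hc : c = '-' <;> simp [pvR, List.dropWhile_cons, hc]
  | case3 c d t hcd ih =>
    obtain ⟨h1, h2⟩ := hcd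
    subst h1; subst h2
    rw [pvR, if_pos ⟨rfl, rfl⟩]
    simp [List.dropWhile_cons]
    rw [pvR, if_pos ⟨rfl, rfl⟩]
  | case4 c d t hcd ih =>
    rw [pvR, if_neg hcd]
    by_cases hc : c = '-'
    · subst hc
      simp [List.dropWhile_cons]
      rw [pvR, if_neg hcd]
    · simp at ih ⊢
      simp [List.dropWhile_cons, hc, ih]

theorem pvSegs_pvR (l : List Char) : pvSegs (pvR l) = pvSegs l := by
  induction hn : l.length using Nat.strong_induction_on generalizing l with
  | _ n IH =>
    subst hn
    match l with
    | [] => simp [pvR]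
    | [c] => simp [pvR]
    | c :: d :: t =>
      by_cases hcd : c = '-' ∧ d = '-'
      · obtain ⟨h1, h2⟩ := hcd
        subst h1; subst h2
        rw [pvR, if_pos ⟨rfl, rfl⟩]
        rw [pvSegs, pvSegs, pvSegs]
        simp only [if_pos rfl]
        exact IH t.length (by simp) t rfl
      · rw [pvR, if_neg hcd]
        by_cases hc : c = '-'
        · subst hc
          rw [pvSegs, pvSegs]
          simp only [if_pos rfl]
          exact IH (d :: t).length (by simp) (d :: t) rfl
        · rw [pvSegs, pvSegs]
          simp only [if_neg hc]
          rw [pvR_takeWhile, pvR_dropWhile]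
          congr 1
          exact IH (List.dropWhile (fun x => x ≠ '-') (d :: t)).length
            (by have := List.length_dropWhile_le (fun x => decide (x ≠ '-')) (d :: t); simp at this ⊢; omega)
            _ rfl

-- right strip of dashes
def pvRsd (s : List Char) : List Char := (s.reverse.dropWhile (fun c => c == '-')).reverse

theorem pvHead_dropWhile_false {p : Char → Bool} {t : List Char} {e : Char} {r : List Char}
    (h : t.dropWhile p = e :: r) : p e = false := by
  induction t with
  | nil => simp at h
  | cons a u ih =>
    rw [List.dropWhile_cons] at h
    by_cases hp : p a
    · simp [hp] at h; exact ih h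
    · simp [hp] at h; rw [← h.1]; simpa using hp

theorem pvRsd_no_dash (s : List Char) (h : ∀ c ∈ s, c ≠ '-') : pvRsd s = s := by
  unfold pvRsd
  rw [List.dropWhile_eq_self_iff.mpr]
  · simp
  · intro hne
    have hm : s.reverse[0] ∈ s := by
      have := List.getElem_mem (l := s.reverse) (n := 0) hne
      simpa using this
    simpa using h _ hm

theorem pvRsd_append_dash (x : List Char) : pvRsd (x ++ ['-']) = pvRsd x := by
  unfold pvRsd
  simp [List.dropWhile_cons]

theorem pvRsd_append (x y : List Char) (c : Char) (hc : c ∈ y) (hcd : c ≠ '-') :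
    pvRsd (x ++ y) = x ++ pvRsd y := by
  unfold pvRsd
  rw [List.reverse_append, List.dropWhile_append]
  have hne : y.reverse.dropWhile (fun c => c == '-') ≠ [] := by
    rw [Ne, List.dropWhile_eq_nil_iff]
    intro hall
    exact absurd (hall c (by simpa using hc)) (by simpa using hcd)
  simp [hne]

theorem pvRsd_segs (n : Nat) : ∀ (s : List Char), s.length ≤ n → ¬ ['-', '-'] <:+: s →
    s.head? ≠ some '-' → pvRsd s = PySem.Chars.join ['-'] (pvSegs s) := by
  induction n using Nat.strong_induction_on with
  | _ n IH =>
    intro s hlen hdd hhead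
    match s with
    | [] => simp [pvRsd, pvSegs, PySem.Chars.join_nil]
    | c :: t =>
      have hc : c ≠ '-' := by simpa using hhead
      have hsplit : t.takeWhile (fun x => x ≠ '-') ++ t.dropWhile (fun x => x ≠ '-') = t :=
        List.takeWhile_append_dropWhile
      have hnodash : ∀ x ∈ c :: t.takeWhile (fun x => x ≠ '-'), x ≠ '-' := by
        intro x hx
        rcases List.mem_cons.mp hx with h | h
        · exact h ▸ hc
        · simpa using List.mem_takeWhile_imp h
      have hsegs : pvSegs (c :: t) = (c :: t.takeWhile (fun x => x ≠ '-')) :: pvSegs (t.dropWhile (fun x => x ≠ '-')) := by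
        rw [pvSegs, if_neg hc]
      match hrr : t.dropWhile (fun x => x ≠ '-') with
      | [] =>
        have hta : t = t.takeWhile (fun x => x ≠ '-') := by
          conv_lhs => rw [← hsplit]
          rw [hrr]; simp
        rw [hsegs, hrr]
        rw [show pvSegs [] = [] from by simp [pvSegs]]
        rw [PySem.Chars.join_singleton]
        conv_lhs => rw [hta]
        exact pvRsd_no_dash _ hnodash
      | e :: r' =>
        have he : e = '-' := by
          have := pvHead_dropWhile_false hrr
          simpa using this
        subst he
        have hst : c :: t = (c :: t.takeWhile (fun x => x ≠ '-')) ++ '-' :: r' := by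
          conv_lhs => rw [← hsplit, hrr]
          simp
        match r' with
        | [] =>
          rw [hsegs, hrr]
          rw [show pvSegs ['-'] = [] from by rw [pvSegs]; simp [pvSegs]]
          rw [PySem.Chars.join_singleton]
          conv_lhs => rw [hst]
          rw [show ('-' :: [] : List Char) = ['-'] from rfl, pvRsd_append_dash]
          exact pvRsd_no_dash _ hnodash
        | f :: r'' =>
          have hf : f ≠ '-' := by
            intro hfe
            apply hdd
            subst hfe
            have h1 : (['-', '-'] : List Char) <:+: ('-' :: '-' :: r'') := ⟨[], r'', rfl⟩
            have h2 : ('-' :: '-' :: r'' : List Char) <:+ t := by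
              conv_rhs => rw [← hsplit, hrr]
              exact List.suffix_append _ _
            exact List.infix_cons (h1.trans h2.isInfix)
          have hsuf2 : ('-' :: f :: r'' : List Char) <:+ t := by
            conv_rhs => rw [← hsplit, hrr]
            exact List.suffix_append _ _
          have hsufr' : (f :: r'' : List Char) <:+ t :=
            (List.suffix_cons '-' _).trans hsuf2
          have hr'dd : ¬ (['-', '-'] : List Char) <:+: (f :: r'') := fun hcon =>
            hdd (List.infix_cons (hcon.trans hsufr'.isInfix))
          have hlen' : (f :: r'').length < n := by
            have h4 := hsuf2.length_le
            simp at hlen h4 ⊢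
            omega
          have hIH := IH (f :: r'').length hlen' (f :: r'') (le_refl _) hr'dd
            (by simpa using hf)
          rw [hsegs, hrr]
          rw [show pvSegs ('-' :: f :: r'') = pvSegs (f :: r'') from by rw [pvSegs]; simp]
          have hsr : pvSegs (f :: r'') =
              (f :: r''.takeWhile (fun x => x ≠ '-')) :: pvSegs (r''.dropWhile (fun x => x ≠ '-')) := by
            rw [pvSegs, if_neg hf]
          rw [hsr, PySem.Chars.join_cons_cons, ← hsr, ← hIH]
          conv_lhs => rw [hst]
          rw [show ((c :: t.takeWhile (fun x => x ≠ '-')) ++ '-' :: f :: r'' : List Char)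
                = (c :: t.takeWhile (fun x => x ≠ '-')) ++ ('-' :: f :: r'') from rfl]
          rw [pvRsd_append _ ('-' :: f :: r'') f (by simp) hf]
          rw [show ('-' :: f :: r'' : List Char) = ['-'] ++ (f :: r'') from rfl]
          rw [pvRsd_append _ (f :: r'') f (by simp) hf]
          simp

-- A's final strip('-') on a string with no '--' equals joining the segments
theorem pvStripChars_eq (s : List Char) :
    PySem.Chars.stripChars s ['-'] = pvRsd (s.dropWhile (fun c => c == '-')) := by
  rw [PySem.Chars.stripChars]
  unfold pvRsd
  have hp : (fun c => List.contains ['-'] c) = (fun c : Char => c == '-') := by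
    funext c
    cases h : c == '-' <;> simp [List.contains, List.elem, h]
  rw [hp]

theorem pvNoDD_tail {c : Char} {t : List Char} (h : ¬ (['-', '-'] : List Char) <:+: (c :: t)) :
    ¬ (['-', '-'] : List Char) <:+: t := fun hc => h (List.infix_cons hc)

theorem pvNoDD_head {t : List Char} (h : ¬ (['-', '-'] : List Char) <:+: ('-' :: t)) :
    t.head? ≠ some '-' := by
  intro hh
  match t with
  | [] => simp at hh
  | d :: u =>
    have : d = '-' := by simpa using hh
    subst this
    exact h ⟨[], u, rfl⟩

theorem pvStrip_eq_join (s : List Char) (h : ¬ ['-', '-'] <:+: s) :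
    PySem.Chars.stripChars s ['-'] = PySem.Chars.join ['-'] (pvSegs s) := by
  rw [pvStripChars_eq]
  match s with
  | [] =>
    rw [show pvSegs ([] : List Char) = [] from by simp [pvSegs], PySem.Chars.join_nil]
    simp [pvRsd]
  | c :: t =>
    by_cases hc : c = '-'
    · subst hc
      rw [List.dropWhile_cons]
      simp only [beq_self_eq_true, if_true]
      have hth := pvNoDD_head h
      have hdt : t.dropWhile (fun c => c == '-') = t := by
        match t with
        | [] => rfl
        | d :: u =>
          rw [List.dropWhile_cons, if_neg]
          simp only [beq_iff_eq]
          simpa using hth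
      rw [hdt]
      rw [show pvSegs ('-' :: t) = pvSegs t from by rw [pvSegs]; simp]
      exact pvRsd_segs t.length t (le_refl _) (pvNoDD_tail h) hth
    · have hds : (c :: t).dropWhile (fun c => c == '-') = c :: t := by
        rw [List.dropWhile_cons, if_neg]
        simpa using hc
      rw [hds]
      exact pvRsd_segs (c :: t).length _ (le_refl _) h (by simpa using hc)

-- A's while loop followed by strip('-') computes the joined segments
theorem pvMain (s : String) :
    (PySem.Str.stripChars (pvWhileDedup s) "-").toList
      = PySem.Chars.join ['-'] (pvSegs s.toList) := by
  induction hn : s.toList.length using Nat.strong_induction_on generalizing s with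
  | _ n IH =>
    subst hn
    rw [pvWhileDedup]
    by_cases hin : PySem.Str.isIn "--" s = true
    · rw [dif_pos hin]
      have hlt := pvDedup_lt s hin
      have hrep : (PySem.Str.replace s "--" "-").toList = pvR s.toList := by
        rw [PySem.Str.toList_replace,
          show ("--".toList : List Char) = ['-', '-'] from by decide,
          show ("-".toList : List Char) = ['-'] from by decide, pvReplace_dd]
      rw [IH (PySem.Str.replace s "--" "-").toList.length hlt (PySem.Str.replace s "--" "-") rfl, hrep, pvSegs_pvR]
    · rw [dif_neg hin]
      rw [PySem.Str.toList_stripChars,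
        show ("-".toList : List Char) = ['-'] from by decide]
      have hni : ¬ ['-', '-'] <:+: s.toList := by
        have hb : PySem.Chars.isIn ("--".toList) s.toList = false := by
          have := eq_false_of_ne_true hin
          simpa [PySem.Str.isIn] using this
        have := (PySem.Chars.isIn_eq_false_iff _ _).mp hb
        simpa using this
      exact pvStrip_eq_join _ hni

-- A's seven sequential replaces are the per-character flatMap
theorem pvRepl_composite (c : Char) :
    List.flatMap
        (fun x =>
          List.flatMap
            (fun x =>
              List.flatMap
                (fun x =>
                  List.flatMap
                    (fun x =>
                      List.flatMap
                        (fun x =>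
                          List.flatMap (fun x => if x = '+' then ['-', 'P', 'L', 'U', 'S', '-'] else [x])
                            (if x = ' ' then ['-'] else [x]))
                        (if x = '.' then ['-'] else [x]))
                    (if x = '$' then ['-', 'D', '-'] else [x]))
                (if x = '=' then ['-', 'U', '-'] else [x]))
            (if x = '/' then ['-', 'W', '-'] else [x]))
        (if c = '^' then ['-', 'P', '-'] else [c]) = pvRepl c := by
  rcases eq_or_ne c '^' with h | h1; · subst h; decide
  rcases eq_or_ne c '/' with h | h2; · subst h; decide
  rcases eq_or_ne c '=' with h | h3; · subst h; decide
  rcases eq_or_ne c '$' with h | h4; · subst h; decide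
  rcases eq_or_ne c '.' with h | h5; · subst h; decide
  rcases eq_or_ne c ' ' with h | h6; · subst h; decide
  rcases eq_or_ne c '+' with h | h7; · subst h; decide
  simp [pvRepl, h1, h2, h3, h4, h5, h6, h7]

theorem pvFold_replaces (s : String) :
    (pvReps.foldl (fun s pr => PySem.Str.replace s pr.1 pr.2) s).toList
      = s.toList.flatMap pvRepl := by
  simp only [pvReps, List.foldl_cons, List.foldl_nil]
  simp only [PySem.Str.toList_replace]
  rw [show ("^".toList : List Char) = ['^'] from by decide,
      show ("/".toList : List Char) = ['/'] from by decide,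
      show ("=".toList : List Char) = ['='] from by decide,
      show ("$".toList : List Char) = ['$'] from by decide,
      show (".".toList : List Char) = ['.'] from by decide,
      show (" ".toList : List Char) = [' '] from by decide,
      show ("+".toList : List Char) = ['+'] from by decide,
      show ("-P-".toList : List Char) = ['-', 'P', '-'] from by decide,
      show ("-W-".toList : List Char) = ['-', 'W', '-'] from by decide,
      show ("-U-".toList : List Char) = ['-', 'U', '-'] from by decide,
      show ("-D-".toList : List Char) = ['-', 'D', '-'] from by decide,
      show ("-".toList : List Char) = ['-'] from by decide,
      show ("-PLUS-".toList : List Char) = ['-', 'P', 'L', 'U', 'S', '-'] from by decide]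
  rw [pvReplace_single, pvReplace_single, pvReplace_single, pvReplace_single,
      pvReplace_single, pvReplace_single, pvReplace_single]
  rw [List.flatMap_assoc, List.flatMap_assoc, List.flatMap_assoc, List.flatMap_assoc,
      List.flatMap_assoc, List.flatMap_assoc]
  exact congrArg (fun f => List.flatMap f s.toList) (funext pvRepl_composite)

-- B's dict lookup is pvRepl
theorem pvGetD_toList (c : Char) :
    (PySem.Dict.getD pvRepsB (String.ofList [c]) (String.ofList [c])).toList = pvRepl c := by
  rcases eq_or_ne c '^' with h | h1; · subst h; decide
  rcases eq_or_ne c '/' with h | h2; · subst h; decide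
  rcases eq_or_ne c '=' with h | h3; · subst h; decide
  rcases eq_or_ne c '$' with h | h4; · subst h; decide
  rcases eq_or_ne c '.' with h | h5; · subst h; decide
  rcases eq_or_ne c ' ' with h | h6; · subst h; decide
  rcases eq_or_ne c '+' with h | h7; · subst h; decide
  have hit : pvRepsB.items = [("^", "-P-"), ("/", "-W-"), ("=", "-U-"), ("$", "-D-"),
      (".", "-"), (" ", "-"), ("+", "-PLUS-")] := by decide
  have mk : ∀ (d : Char), c ≠ d → ((String.ofList [d] : String) == String.ofList [c]) = false := by
    intro d hd
    rw [beq_eq_false_iff_ne]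
    intro he
    have h2 : d = c := by simpa using congrArg String.toList he
    exact hd h2.symm
  have k1 := mk '^' h1
  have k2 := mk '/' h2
  have k3 := mk '=' h3
  have k4 := mk '$' h4
  have k5 := mk '.' h5
  have k6 := mk ' ' h6
  have k7 := mk '+' h7
  simp only [show ("^" : String) = String.ofList ['^'] from by decide,
    show ("/" : String) = String.ofList ['/'] from by decide,
    show ("=" : String) = String.ofList ['='] from by decide,
    show ("$" : String) = String.ofList ['$'] from by decide,
    show ("." : String) = String.ofList ['.'] from by decide,
    show (" " : String) = String.ofList [' '] from by decide,
    show ("+" : String) = String.ofList ['+'] from by decide] at hit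
  simp [PySem.Dict.getD, PySem.Dict.get?, hit, List.find?, k1, k2, k3, k4, k5, k6, k7,
    pvRepl, h1, h2, h3, h4, h5, h6, h7, String.toList_ofList]

theorem pvJoin_nil_sep (L : List (List Char)) :
    PySem.Chars.join [] L = L.flatten := by
  match L with
  | [] => simp [PySem.Chars.join_nil]
  | [x] => simp [PySem.Chars.join_singleton]
  | x :: y :: L =>
    rw [PySem.Chars.join_cons_cons, pvJoin_nil_sep (y :: L)]
    simp

theorem pvMapped_toList (t : List Char) :
    (PySem.Str.join "" (t.map (fun c => PySem.Dict.getD pvRepsB (String.ofList [c]) (String.ofList [c])))).toList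
      = t.flatMap pvRepl := by
  rw [PySem.Str.toList_join, List.map_map,
    show ("".toList : List Char) = [] from by decide, pvJoin_nil_sep, ← List.flatMap_def]
  rw [show (String.toList ∘ fun c => PySem.Dict.getD pvRepsB (String.ofList [c]) (String.ofList [c]))
        = (fun c => (PySem.Dict.getD pvRepsB (String.ofList [c]) (String.ofList [c])).toList) from rfl]
  exact congrArg (fun f => List.flatMap f t) (funext fun c => pvGetD_toList c)

-- B's split/filter/join equals the joined segments
theorem pvAlt_toList (m : String) :
    (PySem.Str.join "-" (((PySem.Str.split? m "-").getD []).filter (fun p => p ≠ ""))).toList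
      = PySem.Chars.join ['-'] (pvSegs m.toList) := by
  have hsplit : PySem.Str.split? m "-" =
      some ((PySem.Chars.splitOn m.toList ("-".toList)).map String.ofList) := by
    rw [PySem.Str.split?, PySem.Chars.split?]
    rw [if_neg (show ¬((("-".toList : List Char)).isEmpty = true) from by decide)]
    rfl
  rw [hsplit]
  rw [show (some ((PySem.Chars.splitOn m.toList ("-".toList)).map String.ofList)).getD []
        = (PySem.Chars.splitOn m.toList ("-".toList)).map String.ofList from rfl]
  rw [List.filter_map]
  rw [PySem.Str.toList_join, List.map_map]
  have hcomp : (String.toList ∘ String.ofList : List Char → List Char) = id := by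
    funext x; simp [String.toList_ofList]
  have hfil : (PySem.Chars.splitOn m.toList ("-".toList)).filter
        ((fun p => decide (p ≠ "")) ∘ String.ofList)
      = (PySem.Chars.splitOn m.toList ("-".toList)).filter (fun x => x ≠ []) := by
    apply List.filter_congr
    intro x _
    simp only [Function.comp]
    rcases eq_or_ne x [] with h | h
    · subst h; simp [show (String.ofList ([] : List Char)) = "" from by decide]
    · have hne : String.ofList x ≠ "" := fun he => h (by simpa using congrArg String.toList he)
      simp [hne, h]
  rw [hcomp, hfil, List.map_id,
    show ("-".toList : List Char) = ['-'] from by decide,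
    pvSplitOn_filter]

-- ===== VERDICT (by name: the statement is the Claim_ definition above) =====
theorem clean_symbol_py_spec : Claim_equal_clean_symbol_py := by
  intro symbol _
  unfold Spec_clean_symbol_py clean_symbol_py clean_symbol_py_alt
  apply String.toList_inj.mp
  rw [pvMain, pvAlt_toList, pvMapped_toList, pvFold_replaces]
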